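-- pv_equiv track=rewrite | github.com/hexagonforce/thesis-sdn-qos | scripts/network_topologies.py | divider
-- ===== SOURCE A (Python) =====
-- def divider(clients, leaves):
--     """
--     Evenly divides the clients to the leaf switches and gives the
--     last client numbers per leaf (1 indexed)
--     example: 70 Clients and 8 Leaves will result in 2 leaves with 8 clients and 6 leaves with 9 clients, therefore the output of
--     divider(70, 8) is [0, 8, 16, 25, 34, 43, 52, 61, 70]
--     """
--     clients_per_leaf = clients // leaves
--     remaining_clients = clients % leaves
--     last_client_number_list = [0, clients_per_leaf]
--     for i in range(1, leaves):
--         if i == leaves - remaining_clients: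
--             clients_per_leaf += 1
--         last_client_number_list.append(clients_per_leaf + last_client_number_list[-1])
--
--     return last_client_number_list
-- ===== SOURCE B (Python) =====
-- def divider(clients, leaves):
--     q = clients // leaves
--     r = clients % leaves
--     return [k * q + max(0, k - (leaves - r)) for k in range(leaves + 1)]
-- ===== Notes on version B (the rewrite author's own statement) =====
-- stated objective: simpler
-- what changed: Replaces the running accumulation loop (appending previous-last + per-leaf count, bumping the count mid-loop) with a single closed-form comprehension computing each boundary independently as k*q + max(0, k-(leaves-r)); Pre_ restricts to the natural domain leaves >= 1 (leaves=0 raises in both, negative leaf counts are an unspecified corner).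
-- outside the precondition, e.g. on divider(5, -2): A returns [0, -3], B returns []; on divider(5, 0): A raises ZeroDivisionError, B raises ZeroDivisionError
import Mathlib
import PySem

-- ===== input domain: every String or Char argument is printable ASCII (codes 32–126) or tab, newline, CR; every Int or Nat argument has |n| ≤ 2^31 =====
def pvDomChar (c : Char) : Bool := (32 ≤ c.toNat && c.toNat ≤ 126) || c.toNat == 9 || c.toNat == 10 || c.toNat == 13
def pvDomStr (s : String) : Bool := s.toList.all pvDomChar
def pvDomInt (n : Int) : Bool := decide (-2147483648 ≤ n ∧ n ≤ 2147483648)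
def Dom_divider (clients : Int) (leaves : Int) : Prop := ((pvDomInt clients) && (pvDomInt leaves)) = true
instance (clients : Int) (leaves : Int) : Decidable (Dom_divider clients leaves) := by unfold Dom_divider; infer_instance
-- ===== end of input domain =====

-- B replaces A's running accumulation loop by a closed-form per-index comprehension (objective: simpler).

-- ===== PORT A =====
def divider (clients : Int) (leaves : Int) : List Int :=
  let clients_per_leaf := PySem.Int.floordiv clients leaves
  let remaining_clients := PySem.Int.mod clients leaves
  let s := (PySem.List.pyRange 1 leaves 1).foldl
    (fun (st : Int × List Int) i =>
      let c := if i = leaves - remaining_clients then st.1 + 1 else st.1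
      (c, st.2 ++ [c + (PySem.List.pyGet? st.2 (-1)).getD 0]))
    (clients_per_leaf, [0, clients_per_leaf])
  s.2

-- ===== PORT B =====
def divider_alt (clients : Int) (leaves : Int) : List Int :=
  let q := PySem.Int.floordiv clients leaves
  let r := PySem.Int.mod clients leaves
  (PySem.List.pyRange 0 (leaves + 1) 1).map (fun k => k * q + max 0 (k - (leaves - r)))

-- ===== PRECONDITION & SPEC =====
-- Pre_ restricts to the natural domain leaves ≥ 1: leaves = 0 raises ZeroDivisionError in both
-- programs, and a negative number of leaf switches is outside the function's purpose — an
-- unspecified corner on which A's [0, clients//leaves] and B's [] are equally defensible.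
def Pre_divider (clients : Int) (leaves : Int) : Prop := 1 ≤ leaves
instance (clients : Int) (leaves : Int) : Decidable (Pre_divider clients leaves) := by unfold Pre_divider; infer_instance
def pvWitness_divider : Int × Int := (70, 8)
def Spec_divider (clients : Int) (leaves : Int) (out : List Int) : Prop := out = divider_alt clients leaves
instance (clients : Int) (leaves : Int) (out : List Int) : Decidable (Spec_divider clients leaves out) := by unfold Spec_divider; infer_instance

-- ===== CLAIM (what is proved, stated in full; the proofs are below) =====
def Claim_equal_divider : Prop := ∀ (clients : Int) (leaves : Int), Dom_divider clients leaves → Pre_divider clients leaves → Spec_divider clients leaves (divider clients leaves)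

-- ===== LEMMAS AND PROOFS =====

-- cpl update step, abstracted: after step i the count is q + [d ≤ i]
lemma cpl_step (q d i : Int) :
    (if i = d then (q + (if d ≤ i - 1 then 1 else 0)) + 1 else q + (if d ≤ i - 1 then 1 else 0))
      = q + (if d ≤ i then 1 else 0) := by
  split_ifs <;> omega

-- value appended at step k: new cpl + previous last boundary = next boundary
lemma val_step (q d k : Int) :
    (q + (if d ≤ k then 1 else 0)) + (k * q + max 0 (k - d)) = (k + 1) * q + max 0 (k + 1 - d) := by
  by_cases h : d ≤ k
  · rw [if_pos h, max_eq_right (by omega), max_eq_right (by omega)]; ring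
  · rw [if_neg h, max_eq_left (by omega), max_eq_left (by omega)]; ring

-- loop invariant: after the first m iterations the state is (q + [d ≤ m], boundaries 0..m+1)
lemma loop_inv (q d : Int) (hd : 1 ≤ d) (m : Nat) :
    (PySem.List.pyRange 1 (1 + (m : Int)) 1).foldl
      (fun (st : Int × List Int) i =>
        let c := if i = d then st.1 + 1 else st.1
        (c, st.2 ++ [c + (PySem.List.pyGet? st.2 (-1)).getD 0]))
      (q, [0, q])
    = (q + (if d ≤ (m : Int) then 1 else 0),
       (PySem.List.pyRange 0 ((m : Int) + 2) 1).map (fun k => k * q + max 0 (k - d))) := by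
  induction m with
  | zero =>
      rw [show ((0:Nat):Int) = 0 by norm_num, PySem.List.pyRange_one_eq_nil (by omega)]
      have h2 : PySem.List.pyRange 0 (0 + 2) 1 = [0, 1] := by decide
      simp only [List.foldl_nil, h2, List.map_cons, List.map_nil]
      rw [if_neg (by omega : ¬ d ≤ (0:Int)), max_eq_left (by omega : (0:Int) - d ≤ 0),
          max_eq_left (by omega : (1:Int) - d ≤ 0)]
      norm_num
  | succ n ih =>
      have hcast : ((n + 1 : Nat) : Int) = (n : Int) + 1 := by push_cast; ring
      rw [hcast, show (1 : Int) + ((n:Int) + 1) = (1 + (n:Int)) + 1 by ring,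
          PySem.List.pyRange_one_succ_right (by omega), List.foldl_append, ih]
      simp only [List.foldl_cons, List.foldl_nil]
      have hlast : (PySem.List.pyGet?
          ((PySem.List.pyRange 0 ((n:Int) + 2) 1).map (fun k => k * q + max 0 (k - d))) (-1)).getD 0
          = ((n:Int) + 1) * q + max 0 ((n:Int) + 1 - d) := by
        rw [show ((n:Int) + 2) = ((n:Int) + 1) + 1 by ring,
            PySem.List.pyRange_one_succ_right (by omega), List.map_append]
        simp only [List.map_cons, List.map_nil]
        rw [PySem.List.pyGet?_neg_one_append_singleton]
        rfl
      have hc : (if (1 + (n:Int)) = d then (q + (if d ≤ (n:Int) then 1 else 0)) + 1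
                 else q + (if d ≤ (n:Int) then 1 else 0))
                = q + (if d ≤ (n:Int) + 1 then 1 else 0) := by
        have := cpl_step q d ((n:Int) + 1)
        rw [show (n:Int) + 1 - 1 = (n:Int) by ring] at this
        rw [show (1 + (n:Int)) = (n:Int) + 1 by ring, this]
      simp only [hlast, hc]
      rw [Prod.mk.injEq]
      refine ⟨rfl, ?_⟩
      rw [show ((n:Int) + 1) + 2 = ((n:Int) + 2) + 1 by ring,
          PySem.List.pyRange_one_succ_right (by omega), List.map_append]
      simp only [List.map_cons, List.map_nil]
      congr 1
      have := val_step q d ((n:Int) + 1)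
      rw [show (n:Int) + 1 + 1 = (n:Int) + 2 by ring] at this
      rw [this]

-- ===== VERDICT (by name: the statement is the Claim_ definition above) =====
theorem divider_spec : Claim_equal_divider := by
  intro clients leaves _ hpre
  unfold Pre_divider at hpre
  unfold Spec_divider divider divider_alt
  set q := PySem.Int.floordiv clients leaves with hq
  set r := PySem.Int.mod clients leaves with hr
  have hrlt : r < leaves := by
    rw [hr, PySem.Int.mod_eq_emod_of_pos (by omega)]
    exact Int.emod_lt_of_pos _ (by omega)
  have hd : 1 ≤ leaves - r := by omega
  have hm : leaves = 1 + (((leaves - 1).toNat : Nat) : Int) := by omega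
  rw [hm]
  have := loop_inv q (leaves - r) hd (leaves - 1).toNat
  have hrw : (1 + (((leaves - 1).toNat : Nat) : Int)) - r = leaves - r := by omega
  simp only [hrw] at *
  rw [this]
  have h2 : (((leaves - 1).toNat : Nat) : Int) + 2 = (1 + (((leaves - 1).toNat : Nat) : Int)) + 1 := by ring
  rw [h2]
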